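-- pv_equiv track=rewrite | github.com/shadowkiller33/Livermore | Trading/metrics.py | barslast
-- ===== SOURCE A (Python) =====
-- def barslast(condition_arr, i):
--     """
--     模拟 BARSLAST(cond) - 从当前 i 往前追溯，
--     找到最近一次 cond=True 的位置距离。
--     若没找到，就返回一个较大数(表示相隔很远)。
--     """
--     for dist in range(0, i+1):
--         idx = i - dist
--         if idx < 0:
--             break
--         if condition_arr[idx]:
--             return dist
--     return i + 1  # 如果从没找到满足 cond 的，就返回 i+1
-- ===== SOURCE B (Python) =====
-- def barslast(condition_arr, i):
--     """Forward single pass: remember the last index <= i where the condition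
--     holds; the answer is the distance back from i (i+1 if none was seen)."""
--     last = -1
--     for idx in range(0, i + 1):
--         if condition_arr[idx]:
--             last = idx
--     return i - last if last >= 0 else i + 1
-- ===== Notes on version B (the rewrite author's own statement) =====
-- stated objective: alternative
-- what changed: Replaces the backward early-exit scan over distances with a forward pass over indices 0..i that tracks the last index where the condition holds, returning i - last (or i+1 if none).
import Mathlib
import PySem

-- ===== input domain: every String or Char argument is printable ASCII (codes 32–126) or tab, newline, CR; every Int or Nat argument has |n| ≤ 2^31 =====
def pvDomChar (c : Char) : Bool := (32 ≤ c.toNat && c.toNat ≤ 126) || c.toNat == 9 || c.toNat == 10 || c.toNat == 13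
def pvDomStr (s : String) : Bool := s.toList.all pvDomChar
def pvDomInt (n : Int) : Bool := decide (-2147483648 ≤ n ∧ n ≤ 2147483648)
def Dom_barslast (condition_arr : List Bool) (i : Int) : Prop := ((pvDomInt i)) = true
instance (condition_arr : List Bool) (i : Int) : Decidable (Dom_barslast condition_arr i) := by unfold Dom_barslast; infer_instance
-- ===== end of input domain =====

-- B replaces A's backward early-exit scan over distances by a forward pass over
-- indices 0..i tracking the last index where the condition holds (objective: alternative decomposition).

-- ===== PORT A =====
-- the 'for dist in range(0, i+1)' loop; 'break' and loop exhaustion both fall through to 'return i + 1'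
def barslastLoopA (condition_arr : List Bool) (i : Int) : List Int → Int
  | [] => i + 1
  | dist :: rest =>
    if i - dist < 0 then i + 1          -- break
    else
      match PySem.List.pyGet? condition_arr (i - dist) with
      | some true => dist               -- return dist
      | some false => barslastLoopA condition_arr i rest
      | none => 0                       -- IndexError; excluded by Pre_barslast

def barslast (condition_arr : List Bool) (i : Int) : Int :=
  barslastLoopA condition_arr i (PySem.List.pyRange 0 (i + 1) 1)

-- ===== PORT B =====
def barslastStepB (condition_arr : List Bool) (last idx : Int) : Int :=
  match PySem.List.pyGet? condition_arr idx with
  | some true => idx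
  | _ => last                           -- (none = IndexError in Python; excluded by Pre_barslast)

def barslast_alt (condition_arr : List Bool) (i : Int) : Int :=
  let last := (PySem.List.pyRange 0 (i + 1) 1).foldl (barslastStepB condition_arr) (-1)
  if last ≥ 0 then i - last else i + 1

-- ===== PRECONDITION & SPEC =====
-- Pre_ excludes exactly the inputs where A raises IndexError: i ≥ len(condition_arr)
def Pre_barslast (condition_arr : List Bool) (i : Int) : Prop := i < (condition_arr.length : Int)
instance (condition_arr : List Bool) (i : Int) : Decidable (Pre_barslast condition_arr i) := by unfold Pre_barslast; infer_instance
def pvWitness_barslast : List Bool × Int := ([false, true, false], 2)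

def Spec_barslast (condition_arr : List Bool) (i : Int) (out : Int) : Prop := out = barslast_alt condition_arr i
instance (condition_arr : List Bool) (i : Int) (out : Int) : Decidable (Spec_barslast condition_arr i out) := by unfold Spec_barslast; infer_instance

-- ===== CLAIM (what is proved, stated in full; the proofs are below) =====
def Claim_equal_barslast : Prop := ∀ (condition_arr : List Bool) (i : Int), Dom_barslast condition_arr i → Pre_barslast condition_arr i → Spec_barslast condition_arr i (barslast condition_arr i)

-- ===== LEMMAS AND PROOFS =====

-- A's loop is 'find the first distance whose index holds', as long as every index visited is valid
theorem loopA_eq_find (arr : List Bool) (i : Int) :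
    ∀ L : List Int, (∀ d ∈ L, 0 ≤ i - d ∧ i - d < (arr.length : Int)) →
      barslastLoopA arr i L =
        match L.find? (fun d => PySem.List.pyGet? arr (i - d) == some true) with
        | some d => d
        | none => i + 1 := by
  intro L
  induction L with
  | nil => intro _; simp [barslastLoopA]
  | cons d rest ih =>
    intro h
    obtain ⟨h0, hlen⟩ := h d (by simp)
    have hget : PySem.List.pyGet? arr (i - d) = some (arr[(i - d).toNat]) :=
      PySem.List.pyGet?_eq_some_getElem arr h0 hlen
    rw [barslastLoopA, if_neg (by omega)]
    rw [List.find?_cons]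
    cases hb : arr[(i - d).toNat] with
    | true => simp [hget, hb]
    | false =>
      rw [hget, hb]
      simpa using ih (fun x hx => h x (by simp [hx]))

-- B's foldl keeps the LAST hit: it equals find? on the reversed list
theorem foldB_eq_find (arr : List Bool) :
    ∀ (L : List Int) (init : Int),
      L.foldl (barslastStepB arr) init =
        ((L.reverse.find? (fun idx => PySem.List.pyGet? arr idx == some true)).getD init) := by
  intro L
  induction L with
  | nil => intro init; simp
  | cons x rest ih =>
    intro init
    rw [List.foldl_cons, ih, List.reverse_cons, List.find?_append]
    cases hf : rest.reverse.find? (fun idx => PySem.List.pyGet? arr idx == some true) with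
    | some y => simp
    | none =>
      simp only [Option.none_or, List.find?_cons, List.find?_nil]
      unfold barslastStepB
      cases PySem.List.pyGet? arr x with
      | none => simp
      | some b => cases b <;> simp

-- reversing the range 0..i is the same as mapping d ↦ i - d over it
theorem reverse_range_eq_map (i : Int) (h : 0 ≤ i) :
    (PySem.List.pyRange 0 (i + 1) 1).reverse =
      (PySem.List.pyRange 0 (i + 1) 1).map (fun d => i - d) := by
  have h1 : PySem.List.pyRange i (-1) (-1) = (PySem.List.pyRange 0 (i + 1) 1).reverse := by
    simpa using PySem.List.pyRange_neg_one_eq_reverse i (-1)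
  rw [← h1, PySem.List.pyRange_neg_one, PySem.List.pyRange_one, List.map_map]
  have h2 : (i - -1).toNat = (i + 1 - 0).toNat := by omega
  rw [h2]
  apply List.map_congr_left
  intro k _
  simp

-- ===== VERDICT (by name: the statement is the Claim_ definition above) =====
theorem barslast_spec : Claim_equal_barslast := by
  intro arr i _ hpre
  unfold Pre_barslast at hpre
  unfold Spec_barslast barslast barslast_alt
  by_cases hi : 0 ≤ i
  case neg =>
    rw [PySem.List.pyRange_one_eq_nil (by omega)]
    simp [barslastLoopA]
  case pos =>
    have hvalid : ∀ d ∈ PySem.List.pyRange 0 (i + 1) 1, 0 ≤ i - d ∧ i - d < (arr.length : Int) := by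
      intro d hd
      have := (PySem.List.mem_pyRange_one).mp hd
      constructor <;> omega
    rw [loopA_eq_find arr i _ hvalid, foldB_eq_find, reverse_range_eq_map i hi, List.find?_map]
    simp only [Function.comp_def]
    cases hf : (PySem.List.pyRange 0 (i + 1) 1).find? (fun d => PySem.List.pyGet? arr (i - d) == some true) with
    | none => simp
    | some d =>
      have hd : d ∈ PySem.List.pyRange 0 (i + 1) 1 := List.mem_of_find?_eq_some hf
      have := (PySem.List.mem_pyRange_one).mp hd
      simp only [Option.map_some, Option.getD_some]
      rw [if_pos (by omega)]
      omega
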